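-- pv_equiv track=rewrite | github.com/MassashiAkuzawa/Estrutura-de-dados | min_max.-.Lucas.Massashi.py | menor_maior
-- ===== SOURCE A (Python) =====
-- def menor_maior(pos,seq):
--     if pos>0:
--         men,mai=menor_maior(pos-1,seq)
--     else:
--         men=seq[0]
--         mai=seq[0]
--     if seq[pos]<men:
--         men=seq[pos]
--     if seq[pos]>mai:
--         mai=seq[pos]
--     return men, mai
-- ===== SOURCE B (Python) =====
-- def menor_maior(pos, seq):
--     men = mai = seq[0]
--     for i in range(1, pos + 1):
--         x = seq[i]
--         if x < men:
--             men = x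
--         if x > mai:
--             mai = x
--     return men, mai
-- ===== Notes on version B (the rewrite author's own statement) =====
-- stated objective: simpler
-- what changed: Replaces A's recursion-unwinding with a single iterative index scan keeping running min/max; Pre_ restricts to the natural domain 0 <= pos < len(seq) -- for negative pos A returns an accidental mix of seq[0] with the negatively-wrapped element seq[pos], outside the function's purpose.
-- outside the precondition, e.g. on menor_maior(-1, [3, 1, 4]): A returns (3, 4), B returns (3, 3)
import Mathlib
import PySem

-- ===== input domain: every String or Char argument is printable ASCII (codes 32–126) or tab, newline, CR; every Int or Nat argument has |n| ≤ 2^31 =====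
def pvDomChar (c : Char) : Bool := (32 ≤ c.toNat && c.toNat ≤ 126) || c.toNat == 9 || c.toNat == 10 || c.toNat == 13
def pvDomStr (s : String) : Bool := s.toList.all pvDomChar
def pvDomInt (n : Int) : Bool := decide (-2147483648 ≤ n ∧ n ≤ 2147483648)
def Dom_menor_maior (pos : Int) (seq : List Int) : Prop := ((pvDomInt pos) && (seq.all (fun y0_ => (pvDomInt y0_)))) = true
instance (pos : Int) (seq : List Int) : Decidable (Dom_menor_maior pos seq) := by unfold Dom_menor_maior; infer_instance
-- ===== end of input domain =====

-- B replaces A's recursion-unwinding with one iterative index scan (i = 1..pos) keeping running min/max: simpler, same cost.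

-- ===== PORT A =====
-- literal transliteration of A's recursion; pyGetD is exact where the index is in range (Pre_ keeps indices in range)
def menor_maior (pos : Int) (seq : List Int) : Int × Int :=
  let mm : Int × Int :=
    if _h : pos > 0 then menor_maior (pos - 1) seq
    else (PySem.List.pyGetD seq 0 0, PySem.List.pyGetD seq 0 0)
  let men := mm.1
  let mai := mm.2
  let x := PySem.List.pyGetD seq pos 0
  (if x < men then x else men, if x > mai then x else mai)
termination_by pos.toNat
decreasing_by omega

-- ===== PORT B =====
def menor_maior_alt (pos : Int) (seq : List Int) : Int × Int :=
  let h := PySem.List.pyGetD seq 0 0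
  (PySem.List.pyRange 1 (pos + 1) 1).foldl
    (fun (p : Int × Int) i =>
      let x := PySem.List.pyGetD seq i 0
      (if x < p.1 then x else p.1, if x > p.2 then x else p.2)) (h, h)

-- ===== PRECONDITION & SPEC =====
-- A raises IndexError on the empty list; Pre_ further restricts to the natural domain 0 ≤ pos < len(seq):
-- for negative pos A returns an accidental mix of seq[0] with the negatively-wrapped element seq[pos].
def Pre_menor_maior (pos : Int) (seq : List Int) : Prop :=
  0 ≤ pos ∧ pos < (seq.length : Int)
instance (pos : Int) (seq : List Int) : Decidable (Pre_menor_maior pos seq) := by unfold Pre_menor_maior; infer_instance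
def pvWitness_menor_maior : Int × List Int := (2, [3, 1, 4])


def Spec_menor_maior (pos : Int) (seq : List Int) (out : Int × Int) : Prop := out = menor_maior_alt pos seq
instance (pos : Int) (seq : List Int) (out : Int × Int) : Decidable (Spec_menor_maior pos seq out) := by unfold Spec_menor_maior; infer_instance

-- ===== CLAIM (what is proved, stated in full; the proofs are below) =====
def Claim_equal_menor_maior : Prop := ∀ (pos : Int) (seq : List Int), Dom_menor_maior pos seq → Pre_menor_maior pos seq → Spec_menor_maior pos seq (menor_maior pos seq)

-- ===== LEMMAS AND PROOFS =====

theorem pv_if_min (a x : Int) : (if x < a then x else a) = min a x := by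
  rcases lt_or_ge x a with h | h <;> simp [min_def, h] <;> omega

theorem pv_if_max (a x : Int) : (if x > a then x else a) = max a x := by
  rcases lt_or_ge a x with h | h <;> simp [max_def, h] <;> omega

-- closed form both ports are reduced to
def pvG (a : Int) (l : List Int) (n : Nat) : Int × Int :=
  ((l.take n).foldl min a, (l.take n).foldl max a)

theorem pv_alt_eq (a : Int) (l : List Int) (n : Nat) (h : n ≤ l.length) :
    menor_maior_alt (n : Int) (a :: l) = pvG a l n := by
  induction n with
  | zero =>
      simp [menor_maior_alt, pvG, PySem.List.pyRange_one_eq_nil, PySem.List.pyGetD_zero_cons]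
  | succ m ih =>
      have hm : m ≤ l.length := by omega
      have hml : m < l.length := by omega
      have ht : l.take (m + 1) = l.take m ++ [l[m]] := by
        rw [List.take_add_one]
        simp [hml]
      have hidx : PySem.List.pyGetD (a :: l) ((m : Int) + 1) 0 = l[m] := by
        have hc : ((m : Int) + 1) = ((m + 1 : Nat) : Int) := by push_cast; ring
        rw [hc, PySem.List.pyGetD_natCast]
        simp [List.getD, hml]
      have hr : PySem.List.pyRange 1 (((m + 1 : Nat) : Int) + 1) 1
          = PySem.List.pyRange 1 ((m : Int) + 1) 1 ++ [(m : Int) + 1] := by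
        have hc : (((m + 1 : Nat) : Int) + 1) = ((m : Int) + 1) + 1 := by push_cast; ring
        rw [hc, PySem.List.pyRange_one_succ_right (by omega)]
      have ihe := ih hm
      simp only [menor_maior_alt, hr, List.foldl_append] at ihe ⊢
      rw [ihe, List.foldl_cons]
      simp only [List.foldl_nil, hidx, pvG, pv_if_min, pv_if_max, ht, List.foldl_append,
        List.foldl_cons, List.foldl_nil]

theorem pv_a_eq (a : Int) (l : List Int) (n : Nat) (h : n ≤ l.length) :
    menor_maior (n : Int) (a :: l) = pvG a l n := by
  induction n with
  | zero =>
      rw [menor_maior]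
      simp [pvG, PySem.List.pyGetD_zero_cons]
  | succ m ih =>
      have hm : m ≤ l.length := by omega
      have hml : m < l.length := by omega
      have ht : l.take (m + 1) = l.take m ++ [l[m]] := by
        rw [List.take_add_one]
        simp [hml]
      have hidx : PySem.List.pyGetD (a :: l) ((m : Int) + 1) 0 = l[m] := by
        have hc : ((m : Int) + 1) = ((m + 1 : Nat) : Int) := by push_cast; ring
        rw [hc, PySem.List.pyGetD_natCast]
        simp [List.getD, hml]
      rw [menor_maior]
      push_cast
      rw [dif_pos (by omega : ((m : Int) + 1) > 0)]
      rw [show ((m : Int) + 1 - 1) = (m : Int) by ring, ih hm, hidx]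
      simp only [pvG, pv_if_min, pv_if_max, ht, List.foldl_append, List.foldl]

-- ===== VERDICT (by name: the statement is the Claim_ definition above) =====
theorem menor_maior_spec : Claim_equal_menor_maior := by
  intro pos seq _hdom hpre
  obtain ⟨hlo, hhi⟩ := hpre
  unfold Spec_menor_maior
  obtain ⟨a, l, rfl⟩ : ∃ a l, seq = a :: l := by
    cases seq with
    | nil =>
        exfalso
        simp only [List.length_nil, Nat.cast_zero] at hhi
        omega
    | cons a l => exact ⟨a, l, rfl⟩
  obtain ⟨n, rfl⟩ : ∃ n : Nat, pos = (n : Int) := ⟨pos.toNat, by omega⟩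
  have hn : n ≤ l.length := by
    simp only [List.length_cons] at hhi
    push_cast at hhi
    omega
  rw [pv_a_eq a l n hn, pv_alt_eq a l n hn]
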